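-- pv_equiv track=rewrite | github.com/keshav-rangan/Game-Pigeon-Anagrams-Solver | main.py | Convert
-- ===== SOURCE A (Python) =====
-- def Convert(letter):
--     pv = 0
--     f = 0
--     for i in range(0, len(letter)):
--         wip = (letter[i]*(2**pv))
--         f += wip
--         pv += 4
--     return f
-- ===== SOURCE B (Python) =====
-- def Convert(letter):
--     f = 0
--     for x in reversed(letter):
--         f = f * 16 + x
--     return f
-- ===== Notes on version B (the rewrite author's own statement) =====
-- stated objective: simpler
-- what changed: Replaces indexed summation of letter[i]*2**(4*i) with Horner's method over the reversed list (f = f*16 + x), dropping the explicit exponent counter and power computation.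
import Mathlib
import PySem

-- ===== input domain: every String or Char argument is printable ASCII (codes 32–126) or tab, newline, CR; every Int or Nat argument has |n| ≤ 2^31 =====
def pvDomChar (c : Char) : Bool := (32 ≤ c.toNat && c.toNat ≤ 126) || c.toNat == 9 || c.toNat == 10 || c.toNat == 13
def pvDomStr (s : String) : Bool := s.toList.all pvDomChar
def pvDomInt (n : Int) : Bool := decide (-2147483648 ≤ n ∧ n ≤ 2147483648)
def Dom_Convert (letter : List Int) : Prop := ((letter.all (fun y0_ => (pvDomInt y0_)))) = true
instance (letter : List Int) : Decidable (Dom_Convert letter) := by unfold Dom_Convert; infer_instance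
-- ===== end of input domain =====

-- B replaces the positional sum letter[i]*2**(4*i) with Horner's method over the reversed
-- list (f = f*16 + x); objective: simpler (no exponent counter, no power computation).

-- ===== PORT A =====
def Convert (letter : List Int) : Int :=
  (PySem.List.pyRange 0 (letter.length : Int) 1).foldl
    (fun (st : Int × Int) i =>
      let wip := PySem.List.pyGetD letter i 0 * 2 ^ st.1.toNat
      (st.1 + 4, st.2 + wip)) (0, 0) |>.2

-- ===== PORT B =====
def Convert_alt (letter : List Int) : Int :=
  letter.reverse.foldl (fun f x => f * 16 + x) 0

-- ===== PRECONDITION & SPEC =====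
def Spec_Convert (letter : List Int) (out : Int) : Prop := out = Convert_alt letter
instance (letter : List Int) (out : Int) : Decidable (Spec_Convert letter out) := by unfold Spec_Convert; infer_instance

-- ===== CLAIM (what is proved, stated in full; the proofs are below) =====
def Claim_equal_Convert : Prop := ∀ (letter : List Int), Dom_Convert letter → Spec_Convert letter (Convert letter)

-- ===== LEMMAS AND PROOFS =====

-- A's loop invariant: after n steps the state is (4n, Σ_{i<n} letter[i]·16^i).
lemma Convert_loop (letter : List Int) (n : Nat) :
    ((List.range n).foldl
      (fun (st : Int × Int) (i : Nat) =>
        (st.1 + 4, st.2 + PySem.List.pyGetD letter (i : Int) 0 * 2 ^ st.1.toNat)) (0, 0))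
    = (((4 * n : Nat) : Int),
       ((List.range n).map (fun i => letter.getD i 0 * 16 ^ i)).sum) := by
  induction n with
  | zero => simp
  | succ n ih =>
    rw [List.range_succ, List.foldl_append, ih]
    simp only [List.foldl_cons, List.foldl_nil, List.map_append, List.map_cons, List.map_nil,
      List.sum_append, List.sum_cons, List.sum_nil, PySem.List.pyGetD_natCast]
    have h4 : ((4 * n : Nat) : Int).toNat = 4 * n := by omega
    have hp : (2 : Int) ^ ((4 * n : Nat) : Int).toNat = 16 ^ n := by
      rw [h4, pow_mul]; norm_num
    rw [hp, Prod.mk.injEq]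
    constructor
    · push_cast; ring
    · ring

-- the indexed sum equals the foldr value
lemma sum_eq_foldr (l : List Int) :
    ((List.range l.length).map (fun i => l.getD i 0 * 16 ^ i)).sum
    = l.foldr (fun x acc => x + 16 * acc) 0 := by
  induction l with
  | nil => simp
  | cons x t ih =>
    rw [List.length_cons, List.range_succ_eq_map, List.map_cons, List.map_map, List.sum_cons]
    simp only [Function.comp_def, Nat.succ_eq_add_one]
    have : ((List.range t.length).map
        (fun i => (x :: t).getD (i + 1) 0 * 16 ^ (i + 1))).sum
        = 16 * ((List.range t.length).map (fun i => t.getD i 0 * 16 ^ i)).sum := by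
      rw [← List.sum_map_mul_left]
      congr 1; apply List.map_congr_left; intro i _
      simp [pow_succ]; ring
    rw [this, ih, List.foldr_cons, List.getD_cons_zero]; ring

-- B's Horner fold equals the same foldr value
lemma horner_eq_foldr (l : List Int) :
    l.reverse.foldl (fun f x => f * 16 + x) 0
    = l.foldr (fun x acc => x + 16 * acc) 0 := by
  induction l with
  | nil => simp
  | cons x t ih =>
    rw [List.reverse_cons, List.foldl_append, ih, List.foldr_cons]
    simp only [List.foldl_cons, List.foldl_nil]; ring

-- ===== VERDICT (by name: the statement is the Claim_ definition above) =====
theorem Convert_spec : Claim_equal_Convert := by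
  intro letter _
  unfold Spec_Convert Convert Convert_alt
  rw [PySem.List.pyRange_zero_natCast, List.foldl_map, Convert_loop,
    horner_eq_foldr, ← sum_eq_foldr]
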